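-- pv_equiv track=rewrite | github.com/PatelFarhaan/chaos-engineering-gremlin | app.py | filter_file_results
-- ===== SOURCE A (Python) =====
-- def filter_file_results(service_cpu_req, service_mem_req, proxy_cpu_req, proxy_mem_req):
--     result = {}
--     result_hm = {}
--
--     temp_hm = {
--         "requests": {
--             "cpu" if service_cpu_req else None: service_cpu_req,
--             "memory" if service_mem_req else None: service_mem_req
--         },
--         "proxy": {
--             "cpu" if proxy_cpu_req else None: proxy_cpu_req,
--             "memory" if proxy_mem_req else None: proxy_mem_req
--         }
--     }
--
--     keys = ["requests", "proxy"]
--     for key in keys: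
--         result_hm[key] = {}
--         for k, v in temp_hm[key].items():
--             if k:
--                 result_hm[key][k] = v
--     for key in keys:
--         if result_hm[key]:
--             result[key] = result_hm[key]
--     return result
-- ===== SOURCE B (Python) =====
-- def filter_file_results(service_cpu_req, service_mem_req, proxy_cpu_req, proxy_mem_req):
--     def sub(cpu, mem):
--         d = {}
--         if cpu:
--             d["cpu"] = cpu
--         if mem:
--             d["memory"] = mem
--         return d
--     result = {}
--     requests = sub(service_cpu_req, service_mem_req)
--     if requests:
--         result["requests"] = requests
--     proxy = sub(proxy_cpu_req, proxy_mem_req)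
--     if proxy:
--         result["proxy"] = proxy
--     return result
-- ===== Notes on version B (the rewrite author's own statement) =====
-- stated objective: simpler
-- what changed: Replaces A's three-phase build (sentinel-None-keyed temp dict, per-key filtering copy into result_hm, then pruning empty sub-dicts) with one direct construction: a helper builds each sub-dict by conditionally adding cpu/memory, and non-empty sub-dicts are added straight to the result.
import Mathlib
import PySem

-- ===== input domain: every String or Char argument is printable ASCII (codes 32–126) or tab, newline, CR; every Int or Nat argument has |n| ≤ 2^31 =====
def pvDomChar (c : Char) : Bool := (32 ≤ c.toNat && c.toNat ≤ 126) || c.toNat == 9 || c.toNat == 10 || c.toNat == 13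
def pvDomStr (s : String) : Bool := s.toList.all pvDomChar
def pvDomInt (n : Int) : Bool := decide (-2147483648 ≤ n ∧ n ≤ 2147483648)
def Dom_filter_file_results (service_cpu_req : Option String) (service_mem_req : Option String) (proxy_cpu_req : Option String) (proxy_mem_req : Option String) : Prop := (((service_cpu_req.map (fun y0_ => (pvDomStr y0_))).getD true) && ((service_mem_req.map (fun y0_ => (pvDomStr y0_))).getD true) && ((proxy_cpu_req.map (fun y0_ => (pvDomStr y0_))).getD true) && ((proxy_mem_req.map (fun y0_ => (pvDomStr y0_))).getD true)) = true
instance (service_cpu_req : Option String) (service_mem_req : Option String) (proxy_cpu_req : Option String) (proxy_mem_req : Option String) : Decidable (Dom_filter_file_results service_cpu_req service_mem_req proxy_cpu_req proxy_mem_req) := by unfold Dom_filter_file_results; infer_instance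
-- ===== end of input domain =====

-- B builds each sub-dict directly with conditional inserts instead of A's sentinel-None-key temp dict plus filter-and-prune passes (simpler decomposition, same cost).


-- ===== PORT A =====
-- Python truthiness of an Optional[str]: None and "" are falsy
def pyTruthy (o : Option String) : Bool :=
  match o with
  | none => false
  | some s => decide (s ≠ "")

-- the inner loop 'for k, v in temp_hm[key].items(): if k: result_hm[key][k] = v'
-- (keys with a truthy value are always paired with a `some` value, so `.getD ""` is never the default)
def pvCopyTruthyKeys (t : PySem.Dict (Option String) (Option String)) : List (String × String) :=
  t.items.foldl (fun acc kv =>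
    match kv.1 with
    | some k => if k ≠ "" then acc ++ [(k, kv.2.getD "")] else acc
    | none => acc) []

def filter_file_results (service_cpu_req : Option String) (service_mem_req : Option String) (proxy_cpu_req : Option String) (proxy_mem_req : Option String) : List (String × List (String × String)) :=
  -- temp_hm: dict literals with possibly-colliding None sentinel keys (later value overwrites)
  let temp_requests : PySem.Dict (Option String) (Option String) :=
    ((PySem.Dict.empty.insert (if pyTruthy service_cpu_req then some "cpu" else none) service_cpu_req).insert
      (if pyTruthy service_mem_req then some "memory" else none) service_mem_req)
  let temp_proxy : PySem.Dict (Option String) (Option String) :=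
    ((PySem.Dict.empty.insert (if pyTruthy proxy_cpu_req then some "cpu" else none) proxy_cpu_req).insert
      (if pyTruthy proxy_mem_req then some "memory" else none) proxy_mem_req)
  let result_hm : List (String × List (String × String)) :=
    [("requests", pvCopyTruthyKeys temp_requests), ("proxy", pvCopyTruthyKeys temp_proxy)]
  -- for key in keys: if result_hm[key]: result[key] = result_hm[key]
  result_hm.foldl (fun res kv => if kv.2 ≠ [] then res ++ [kv] else res) []

-- ===== PORT B =====
-- B helper: build one sub-dict directly, adding only truthy entries
def pvSub (cpu mem : Option String) : List (String × String) :=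
  let d : List (String × String) := []
  let d := if pyTruthy cpu then d ++ [("cpu", cpu.getD "")] else d
  let d := if pyTruthy mem then d ++ [("memory", mem.getD "")] else d
  d

def filter_file_results_alt (service_cpu_req : Option String) (service_mem_req : Option String) (proxy_cpu_req : Option String) (proxy_mem_req : Option String) : List (String × List (String × String)) :=
  let result : List (String × List (String × String)) := []
  let requests := pvSub service_cpu_req service_mem_req
  let result := if requests ≠ [] then result ++ [("requests", requests)] else result
  let proxy := pvSub proxy_cpu_req proxy_mem_req
  if proxy ≠ [] then result ++ [("proxy", proxy)] else result

-- ===== PRECONDITION & SPEC =====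
def Spec_filter_file_results (service_cpu_req : Option String) (service_mem_req : Option String) (proxy_cpu_req : Option String) (proxy_mem_req : Option String) (out : List (String × List (String × String))) : Prop := out = filter_file_results_alt service_cpu_req service_mem_req proxy_cpu_req proxy_mem_req
instance (service_cpu_req : Option String) (service_mem_req : Option String) (proxy_cpu_req : Option String) (proxy_mem_req : Option String) (out : List (String × List (String × String))) : Decidable (Spec_filter_file_results service_cpu_req service_mem_req proxy_cpu_req proxy_mem_req out) := by unfold Spec_filter_file_results; infer_instance

-- ===== CLAIM (what is proved, stated in full; the proofs are below) =====
def Claim_equal_filter_file_results : Prop := ∀ (service_cpu_req : Option String) (service_mem_req : Option String) (proxy_cpu_req : Option String) (proxy_mem_req : Option String), Dom_filter_file_results service_cpu_req service_mem_req proxy_cpu_req proxy_mem_req → Spec_filter_file_results service_cpu_req service_mem_req proxy_cpu_req proxy_mem_req (filter_file_results service_cpu_req service_mem_req proxy_cpu_req proxy_mem_req)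

-- ===== LEMMAS AND PROOFS =====

-- ===== VERDICT (by name: the statement is the Claim_ definition above) =====
theorem filter_file_results_spec : Claim_equal_filter_file_results := by
  intro a b c d _
  unfold Spec_filter_file_results
  rcases ha : pyTruthy a <;> rcases hb : pyTruthy b <;>
    rcases hc : pyTruthy c <;> rcases hd : pyTruthy d <;>
      · simp only [filter_file_results, filter_file_results_alt, pvSub, pvCopyTruthyKeys,
          ha, hb, hc, hd]
        rfl
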